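-- pv_equiv track=rewrite | github.com/wattanunteeratanapong/01076109-OBJECT-ORIENTED-DATA-STRUCTURES | Lab7/Chapter9 (Sort)/9.2.py | sort_non_negative_elements
-- ===== SOURCE A (Python) =====
-- def sort_non_negative_elements(arr):
--     pos_values = [val for val in arr if val >= 0]
--
--     for idx in range(len(pos_values)):
--         for nxt in range(idx + 1, len(pos_values)):
--             if pos_values[idx] > pos_values[nxt]:
--                 pos_values[idx], pos_values[nxt] = pos_values[nxt], pos_values[idx]
--
--     pos_val_idx = 0
--     for idx in range(len(arr)):
--         if arr[idx] >= 0: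
--             arr[idx] = pos_values[pos_val_idx]
--             pos_val_idx += 1
--
--     return arr
-- ===== SOURCE B (Python) =====
-- def sort_non_negative_elements(arr):
--     it = iter(sorted(x for x in arr if x >= 0))
--     arr[:] = [next(it) if x >= 0 else x for x in arr]
--     return arr
-- ===== Notes on version B (the rewrite author's own statement) =====
-- stated objective: idiomatic
-- what changed: Replaces the hand-written index-swapping exchange sort and the counter-driven write-back loop with Python's built-in sorted() on the non-negative values and a single comprehension that splices them back from an iterator.
import Mathlib
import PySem

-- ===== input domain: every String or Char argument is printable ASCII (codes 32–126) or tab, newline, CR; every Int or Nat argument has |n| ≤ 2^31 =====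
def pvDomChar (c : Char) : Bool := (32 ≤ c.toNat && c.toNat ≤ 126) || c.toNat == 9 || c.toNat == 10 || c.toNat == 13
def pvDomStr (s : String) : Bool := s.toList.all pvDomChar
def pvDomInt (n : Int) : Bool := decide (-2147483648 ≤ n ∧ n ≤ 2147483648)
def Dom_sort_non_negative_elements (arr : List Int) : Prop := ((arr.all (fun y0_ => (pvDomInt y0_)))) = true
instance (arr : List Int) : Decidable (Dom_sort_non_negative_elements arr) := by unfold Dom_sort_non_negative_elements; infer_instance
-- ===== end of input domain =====

-- B sorts the non-negative values with the library sort and splices them back in one comprehension pass,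
-- instead of A's hand-written index-swapping exchange sort and counter-driven write-back loop;
-- the equivalence is about the return value (both Pythons also leave the argument list with these contents).

-- ===== PORT A =====
-- inner-loop body: 'if pos_values[idx] > pos_values[nxt]: swap'
def pvInnerStep (idx : Int) (pv : List Int) (nxt : Int) : List Int :=
  if PySem.List.pyGetD pv idx 0 > PySem.List.pyGetD pv nxt 0 then
    (pv.set idx.toNat (PySem.List.pyGetD pv nxt 0)).set nxt.toNat (PySem.List.pyGetD pv idx 0)
  else pv

def sort_non_negative_elements (arr : List Int) : List Int :=
  let posValues := arr.filter (fun val => val ≥ 0)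
  let pv := (PySem.List.pyRange 0 posValues.length 1).foldl
      (fun pv idx =>
        (PySem.List.pyRange (idx + 1) posValues.length 1).foldl (pvInnerStep idx) pv)
      posValues
  let st := (PySem.List.pyRange 0 arr.length 1).foldl
      (fun (st : List Int × Int) idx =>
        if PySem.List.pyGetD st.1 idx 0 ≥ 0 then
          (st.1.set idx.toNat (PySem.List.pyGetD pv st.2 0), st.2 + 1)
        else st)
      (arr, 0)
  st.1

-- ===== PORT B =====
-- '[next(it) if x >= 0 else x for x in arr]' with 'it' an iterator over the sorted non-negatives
def pvFill : List Int → List Int → List Int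
  | [], _ => []
  | x :: xs, s => if x ≥ 0 then s.headD 0 :: pvFill xs s.tail else x :: pvFill xs s

def sort_non_negative_elements_alt (arr : List Int) : List Int :=
  pvFill arr (PySem.List.sorted (arr.filter (fun x => x ≥ 0)) (fun x => x) false)

-- ===== PRECONDITION & SPEC =====
def Spec_sort_non_negative_elements (arr : List Int) (out : List Int) : Prop := out = sort_non_negative_elements_alt arr
instance (arr : List Int) (out : List Int) : Decidable (Spec_sort_non_negative_elements arr out) := by unfold Spec_sort_non_negative_elements; infer_instance

-- ===== CLAIM (what is proved, stated in full; the proofs are below) =====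
def Claim_equal_sort_non_negative_elements : Prop := ∀ (arr : List Int), Dom_sort_non_negative_elements arr → Spec_sort_non_negative_elements arr (sort_non_negative_elements arr)


-- ===== LEMMAS AND PROOFS =====

-- one pass of A's inner loop, as a recursion: returns (value left at position idx, rest of the scanned suffix)
def pvSelect : Int → List Int → Int × List Int
  | c, [] => (c, [])
  | c, y :: ys =>
    if c > y then ((pvSelect y ys).1, c :: (pvSelect y ys).2)
    else ((pvSelect c ys).1, y :: (pvSelect c ys).2)

theorem pvSelect_length (c : Int) (ys : List Int) : (pvSelect c ys).2.length = ys.length := by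
  induction ys generalizing c with
  | nil => rfl
  | cons y ys ih => simp only [pvSelect]; split <;> simp [ih]

-- A's nested loops, as selection sort
def pvSelSort : List Int → List Int
  | [] => []
  | c :: ys => (pvSelect c ys).1 :: pvSelSort (pvSelect c ys).2
termination_by l => l.length
decreasing_by simp [pvSelect_length]

theorem pvSelect_perm (c : Int) (ys : List Int) :
    ((pvSelect c ys).1 :: (pvSelect c ys).2).Perm (c :: ys) := by
  induction ys generalizing c with
  | nil => rfl
  | cons y ys ih =>
    simp only [pvSelect]; split <;> dsimp only
    · exact (List.Perm.swap c _ _).trans ((ih y).cons c)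
    · exact ((List.Perm.swap y _ _).trans ((ih c).cons y)).trans (List.Perm.swap c y ys)

theorem pvSelect_min (c : Int) (ys : List Int) :
    (pvSelect c ys).1 ≤ c ∧ ∀ z ∈ (pvSelect c ys).2, (pvSelect c ys).1 ≤ z := by
  induction ys generalizing c with
  | nil => simp [pvSelect]
  | cons y ys ih =>
    simp only [pvSelect]; split
    · rename_i h
      refine ⟨le_of_lt (lt_of_le_of_lt (ih y).1 h), ?_⟩
      intro z hz; rcases List.mem_cons.mp hz with rfl | hz
      · exact le_of_lt (lt_of_le_of_lt (ih y).1 h)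
      · exact (ih y).2 z hz
    · rename_i h
      refine ⟨(ih c).1, ?_⟩
      intro z hz; rcases List.mem_cons.mp hz with rfl | hz
      · exact le_trans (ih c).1 (le_of_not_gt h)
      · exact (ih c).2 z hz

theorem pvSelSort_perm (l : List Int) : (pvSelSort l).Perm l := by
  induction l using pvSelSort.induct with
  | case1 => simp [pvSelSort]
  | case2 c ys ih =>
    rw [pvSelSort]
    exact (ih.cons _).trans (pvSelect_perm c ys)

theorem pvSelSort_pairwise (l : List Int) : (pvSelSort l).Pairwise (· ≤ ·) := by
  induction l using pvSelSort.induct with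
  | case1 => simp [pvSelSort]
  | case2 c ys ih =>
    rw [pvSelSort]
    refine List.pairwise_cons.mpr ⟨?_, ih⟩
    intro z hz
    exact (pvSelect_min c ys).2 z ((pvSelSort_perm _).mem_iff.mp hz)

theorem sorted_eq_pvSelSort (l : List Int) :
    PySem.List.sorted l (fun x => x) false = pvSelSort l :=
  PySem.List.sorted_id_eq_of_perm_of_pairwise l (pvSelSort l) (pvSelSort_perm l) (pvSelSort_pairwise l)

-- ----- bridge: A's inner loop equals pvSelect -----
theorem inner_fold (rest : List Int) : ∀ (q p : List Int) (c : Int) (a : Int),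
    a = (p.length : Int) + 1 + q.length →
    (PySem.List.pyRange a (a + rest.length) 1).foldl
      (pvInnerStep (p.length : Int)) (p ++ c :: (q ++ rest))
    = p ++ (pvSelect c rest).1 :: (q ++ (pvSelect c rest).2) := by
  induction rest with
  | nil => intro q p c a ha; simp [pvSelect, PySem.List.pyRange_one_eq_nil]
  | cons y ys ih =>
    intro q p c a ha
    subst ha
    rw [PySem.List.pyRange_one_cons (by simp only [List.length_cons]; push_cast; omega),
        List.foldl_cons]
    have hgetc : PySem.List.pyGetD (p ++ c :: (q ++ y :: ys)) (p.length : Int) 0 = c := by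
      rw [PySem.List.pyGetD_natCast]; simp
    have hgety : PySem.List.pyGetD (p ++ c :: (q ++ y :: ys)) ((p.length : Int) + 1 + q.length) 0 = y := by
      have h : ((p.length : Int) + 1 + q.length) = ((p.length + 1 + q.length : Nat) : Int) := by
        push_cast; ring
      rw [h, PySem.List.pyGetD_natCast]
      rw [show p ++ c :: (q ++ y :: ys) = (p ++ c :: q) ++ y :: ys by simp]
      rw [List.getD_eq_getElem?_getD, List.getElem?_append_right (by simp; omega)]
      simp [show p.length + 1 + q.length - (p.length + (q.length + 1)) = 0 by omega]
    by_cases hcy : c > y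
    · have hstep : pvInnerStep (p.length : Int) (p ++ c :: (q ++ y :: ys)) ((p.length : Int) + 1 + q.length)
          = p ++ y :: (q ++ c :: ys) := by
        unfold pvInnerStep
        rw [hgetc, hgety, if_pos hcy]
        rw [show (p ++ c :: (q ++ y :: ys)).set ((p.length : Int)).toNat y = p ++ y :: (q ++ y :: ys) by
          simp]
        rw [show ((p.length : Int) + 1 + q.length).toNat = (p ++ y :: q).length + 0 by simp; omega]
        rw [show p ++ y :: (q ++ y :: ys) = (p ++ y :: q) ++ y :: ys by simp]
        rw [List.set_append_right _ _ (by omega)]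
        simp
      rw [hstep]
      have := ih (q ++ [c]) p y ((p.length : Int) + 1 + q.length + 1)
        (by simp only [List.length_append, List.length_cons, List.length_nil]; push_cast; ring)
      rw [show ((p.length : Int) + 1 + ↑q.length + ((y :: ys).length : Int))
            = ((p.length : Int) + 1 + ↑q.length + 1 + (ys.length : Int)) by
        simp only [List.length_cons]; push_cast; ring]
      simp only [List.append_assoc, List.cons_append, List.nil_append] at this ⊢
      rw [this]
      simp [pvSelect, hcy]
    · have hstep : pvInnerStep (p.length : Int) (p ++ c :: (q ++ y :: ys)) ((p.length : Int) + 1 + q.length)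
          = p ++ c :: (q ++ y :: ys) := by
        unfold pvInnerStep
        rw [hgetc, hgety, if_neg (by omega)]
      rw [hstep]
      have := ih (q ++ [y]) p c ((p.length : Int) + 1 + q.length + 1)
        (by simp only [List.length_append, List.length_cons, List.length_nil]; push_cast; ring)
      rw [show ((p.length : Int) + 1 + ↑q.length + ((y :: ys).length : Int))
            = ((p.length : Int) + 1 + ↑q.length + 1 + (ys.length : Int)) by
        simp only [List.length_cons]; push_cast; ring]
      simp only [List.append_assoc, List.cons_append, List.nil_append] at this ⊢
      rw [this]
      simp [pvSelect, hcy]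

-- ----- bridge: A's outer loop equals pvSelSort -----
theorem outer_fold (l : List Int) : ∀ (p : List Int) (a b : Int),
    a = (p.length : Int) → b = (p.length : Int) + l.length →
    (PySem.List.pyRange a b 1).foldl
      (fun pv idx => (PySem.List.pyRange (idx + 1) b 1).foldl (pvInnerStep idx) pv)
      (p ++ l)
    = p ++ pvSelSort l := by
  induction l using pvSelSort.induct with
  | case1 =>
    intro p a b ha hb
    simp [pvSelSort, PySem.List.pyRange_one_eq_nil, ha, hb]
  | case2 c ys ih =>
    intro p a b ha hb
    subst ha; subst hb
    rw [PySem.List.pyRange_one_cons (by simp only [List.length_cons]; push_cast; omega),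
        List.foldl_cons]
    have hin := inner_fold ys [] p c ((p.length : Int) + 1) (by simp)
    simp only [List.nil_append] at hin
    rw [show ((p.length : Int) + ((c :: ys).length : Int)) = ((p.length : Int) + 1 + (ys.length : Int)) by
      simp only [List.length_cons]; push_cast; ring]
    rw [hin]
    have := ih (p ++ [(pvSelect c ys).1]) ((p.length : Int) + 1)
      ((p.length : Int) + 1 + (ys.length : Int))
      (by simp)
      (by simp only [List.length_append, List.length_cons, List.length_nil, pvSelect_length]
          push_cast; ring)
    simp only [List.append_assoc, List.cons_append, List.nil_append] at this ⊢
    rw [this, pvSelSort]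

-- ----- bridge: A's write-back loop equals pvFill -----
theorem fill_fold (xs : List Int) (s : List Int) : ∀ (p : List Int) (k a : Int),
    a = (p.length : Int) → 0 ≤ k →
    ((PySem.List.pyRange a (a + xs.length) 1).foldl
      (fun (st : List Int × Int) idx =>
        if PySem.List.pyGetD st.1 idx 0 ≥ 0 then
          (st.1.set idx.toNat (PySem.List.pyGetD s st.2 0), st.2 + 1)
        else st)
      (p ++ xs, k)).1
    = p ++ pvFill xs (s.drop k.toNat) := by
  induction xs with
  | nil => intro p k a ha hk; simp [pvFill, PySem.List.pyRange_one_eq_nil]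
  | cons x xs ih =>
    intro p k a ha hk
    subst ha
    rw [PySem.List.pyRange_one_cons (by simp only [List.length_cons]; push_cast; omega),
        List.foldl_cons]
    have hget : PySem.List.pyGetD (p ++ x :: xs) (p.length : Int) 0 = x := by
      rw [PySem.List.pyGetD_natCast]; simp
    have hgets : PySem.List.pyGetD s k 0 = (s.drop k.toNat).headD 0 := by
      rw [PySem.List.pyGetD_of_nonneg _ _ hk]
      rw [List.getD_eq_getElem?_getD, ← List.head?_drop]
      cases h : (s.drop k.toNat).head? <;> simp [List.headD_eq_head?_getD, h]
    rw [show ((p.length : Int) + ((x :: xs).length : Int)) = ((p.length : Int) + 1 + (xs.length : Int)) by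
      simp only [List.length_cons]; push_cast; ring]
    by_cases hx : x ≥ 0
    · rw [show (if PySem.List.pyGetD (p ++ x :: xs, k).1 (p.length : Int) 0 ≥ 0 then
            ((p ++ x :: xs, k).1.set ((p.length : Int)).toNat (PySem.List.pyGetD s (p ++ x :: xs, k).2 0),
              (p ++ x :: xs, k).2 + 1)
          else (p ++ x :: xs, k))
          = (p ++ PySem.List.pyGetD s k 0 :: xs, k + 1) by
        rw [if_pos (by simpa [hget] using hx)]; simp]
      have := ih (p ++ [PySem.List.pyGetD s k 0]) (k + 1) ((p.length : Int) + 1) (by simp) (by omega)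
      simp only [List.append_assoc, List.cons_append, List.nil_append] at this ⊢
      rw [this]
      rw [show (k + 1).toNat = k.toNat + 1 by omega, ← List.tail_drop]
      rw [pvFill, if_pos hx, hgets]
    · rw [show (if PySem.List.pyGetD (p ++ x :: xs, k).1 (p.length : Int) 0 ≥ 0 then
            ((p ++ x :: xs, k).1.set ((p.length : Int)).toNat (PySem.List.pyGetD s (p ++ x :: xs, k).2 0),
              (p ++ x :: xs, k).2 + 1)
          else (p ++ x :: xs, k))
          = (p ++ x :: xs, k) by rw [if_neg (by simpa [hget] using hx)]]
      have := ih (p ++ [x]) k ((p.length : Int) + 1) (by simp) hk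
      simp only [List.append_assoc, List.cons_append, List.nil_append] at this ⊢
      rw [this, pvFill, if_neg hx]

-- ===== VERDICT (by name: the statement is the Claim_ definition above) =====
theorem sort_non_negative_elements_spec : Claim_equal_sort_non_negative_elements := by
  intro arr _
  unfold Spec_sort_non_negative_elements sort_non_negative_elements sort_non_negative_elements_alt
  simp only []
  have houter := outer_fold (arr.filter (fun val => decide (val ≥ 0))) [] 0
    ((arr.filter (fun val => decide (val ≥ 0))).length : Int) (by simp) (by simp)
  simp only [List.nil_append] at houter
  rw [houter]
  have hfill := fill_fold arr (pvSelSort (arr.filter (fun val => decide (val ≥ 0)))) [] 0 0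
    (by simp) (le_refl 0)
  simp only [List.nil_append, Int.toNat_zero, List.drop_zero, zero_add] at hfill
  rw [hfill, sorted_eq_pvSelSort]
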